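-- pv_equiv track=rewrite | github.com/TencentCloudADP/youtu-rag | utu/rag/knowledge_builder/chunk_processor.py | parse_answer_chunking_point
-- ===== SOURCE A (Python) =====
-- def parse_answer_chunking_point(answer_string, max_level):
--     level_dict_en = {
--         0: 'Level One', 1: 'Level Two', 2: 'Level Three', 3: 'Level Four', 4: 'Level Five',
--         5: 'Level Six', 6: 'Level Seven', 7: 'Level Eight', 8: 'Level Nine', 9: 'Level Ten',
--     }
--     local_chunk_points = {level_dict_en[i]: [] for i in range(max_level)}
--
--     if not answer_string:
--         return list(local_chunk_points.values())
--
--     for line in answer_string.split('\n'):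
--         line = line.strip()
--         if not line:
--             continue
--         parts = line.split(', ')
--         if len(parts) < 3:
--             continue
--         point, level = parts[0], parts[1]
--         if level in local_chunk_points:
--             try:
--                 local_chunk_points[level].append(int(point))
--             except ValueError:
--                 continue
--
--     res = list(local_chunk_points.values())
--     for idx, _ in enumerate(res):
--         if len(_) == 0:
--             continue
--         keep_idx = list(filter(lambda i: _[i] > _[i-1], range(1, len(_))))
--         res[idx] = [_[0]] + list(map(lambda i: _[i], keep_idx))
--     return res
-- ===== SOURCE B (Python) =====
-- LEVEL_NAMES = ['Level One', 'Level Two', 'Level Three', 'Level Four', 'Level Five',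
--                'Level Six', 'Level Seven', 'Level Eight', 'Level Nine', 'Level Ten']
--
--
-- def parse_answer_chunking_point(answer_string, max_level):
--     lines = answer_string.split('\n')
--     out = []
--     for i in range(max_level):
--         name = LEVEL_NAMES[i]
--         kept, last = [], None
--         for line in lines:
--             parts = line.strip().split(', ')
--             if len(parts) < 3 or parts[1] != name:
--                 continue
--             try:
--                 v = int(parts[0])
--             except ValueError:
--                 continue
--             if last is None or v > last:
--                 kept.append(v)
--             last = v
--         out.append(kept)
--     return out
-- ===== Notes on version B (the rewrite author's own statement) =====
-- stated objective: alternative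
-- what changed: B drops A's dict-of-raw-lists plus second index-filter pass: for each level it makes one fused pass over the lines, keeping a value iff it is the level's first or strictly greater than the raw predecessor (tracked in a last-seen variable), so the intermediate raw lists and the range/filter index pass disappear.
import Mathlib
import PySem

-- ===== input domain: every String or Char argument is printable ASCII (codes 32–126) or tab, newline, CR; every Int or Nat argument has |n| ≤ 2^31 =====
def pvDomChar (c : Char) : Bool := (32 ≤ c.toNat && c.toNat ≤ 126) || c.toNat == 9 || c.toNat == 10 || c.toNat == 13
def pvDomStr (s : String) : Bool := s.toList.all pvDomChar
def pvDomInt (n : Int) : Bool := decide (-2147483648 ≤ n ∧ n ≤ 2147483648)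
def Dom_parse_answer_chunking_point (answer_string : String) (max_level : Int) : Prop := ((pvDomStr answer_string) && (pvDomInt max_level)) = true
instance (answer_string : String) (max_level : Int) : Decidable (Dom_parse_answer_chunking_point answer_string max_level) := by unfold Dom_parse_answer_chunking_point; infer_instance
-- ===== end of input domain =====

-- B re-implements A as one fused filter-while-parsing pass per level (no dict, no raw
-- intermediate lists, no index/filter second pass); proved equal for max_level ≤ 10
-- (above that A raises KeyError).

-- s.split(sep) for a nonempty separator, via the total Chars form (exact for sep ≠ "")
def pvSplit (s sep : String) : List String :=
  (PySem.Chars.splitOn s.toList sep.toList).map String.ofList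

-- ===== PORT A =====
def pvLevelDictEn : PySem.Dict Int String := PySem.Dict.ofList
  [(0, "Level One"), (1, "Level Two"), (2, "Level Three"), (3, "Level Four"), (4, "Level Five"),
   (5, "Level Six"), (6, "Level Seven"), (7, "Level Eight"), (8, "Level Nine"), (9, "Level Ten")]

-- dict comprehension {level_dict_en[i]: [] for i in range(max_level)}; under Pre_ every
-- get? is some, so the getD "" default is never taken (it is the KeyError case)
def pvInitDict (max_level : Int) : PySem.Dict String (List Int) :=
  (PySem.List.pyRange 0 max_level 1).foldl
    (fun d i => d.insert ((pvLevelDictEn.get? i).getD "") ([] : List Int)) PySem.Dict.empty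

-- the body of A's line loop (strip, empty skip, split ', ', len<3 skip, membership, int())
def pvBodyA (d : PySem.Dict String (List Int)) (line : String) : PySem.Dict String (List Int) :=
  let line := PySem.Str.strip line
  if line = "" then d
  else
    match pvSplit line ", " with
    | p0 :: p1 :: _ :: _ =>
        if d.contains p1 then
          match PySem.Int.ofStr? p0 with
          | some v => d.modify p1 [] (· ++ [v])
          | none => d
        else d
    | _ => d

-- A's second pass: keep_idx = filter(lambda i: _[i] > _[i-1], range(1, len(_))); [_[0]] + map
-- (pyGetD 0 is exact here: every index A uses is in range)
def pvFilterA (xs : List Int) : List Int :=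
  if xs.length = 0 then xs
  else
    let keep := (PySem.List.pyRange 1 (xs.length : Int) 1).filter
      (fun i => PySem.List.pyGetD xs i 0 > PySem.List.pyGetD xs (i - 1) 0)
    PySem.List.pyGetD xs 0 0 :: keep.map (fun i => PySem.List.pyGetD xs i 0)

def parse_answer_chunking_point (answer_string : String) (max_level : Int) : List (List Int) :=
  let local_chunk_points := pvInitDict max_level
  if answer_string = "" then local_chunk_points.values
  else
    let d := (pvSplit answer_string "\n").foldl pvBodyA local_chunk_points
    d.values.map pvFilterA

-- ===== PORT B =====
def pvLevelNames : List String :=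
  ["Level One", "Level Two", "Level Three", "Level Four", "Level Five",
   "Level Six", "Level Seven", "Level Eight", "Level Nine", "Level Ten"]

-- B's inner loop body: parse the line; keep v iff first for this level or > last raw value
def pvBodyB (name : String) (st : List Int × Option Int) (line : String) : List Int × Option Int :=
  match pvSplit (PySem.Str.strip line) ", " with
  | p0 :: p1 :: _ :: _ =>
      if p1 = name then
        match PySem.Int.ofStr? p0 with
        | some v =>
            match st.2 with
            | none => (st.1 ++ [v], some v)
            | some last => (if v > last then st.1 ++ [v] else st.1, some v)
        | none => st
      else st
  | _ => st

def parse_answer_chunking_point_alt (answer_string : String) (max_level : Int) : List (List Int) :=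
  let lines := pvSplit answer_string "\n"
  (PySem.List.pyRange 0 max_level 1).map (fun i =>
    let name := PySem.List.pyGetD pvLevelNames i ""   -- LEVEL_NAMES[i]; in range under Pre_
    (lines.foldl (pvBodyB name) (([] : List Int), (none : Option Int))).1)

-- ===== PRECONDITION & SPEC =====
-- Pre_ excludes max_level ≥ 11, where A raises KeyError building the level dict (and B
-- raises IndexError); on every other input both return.
def Pre_parse_answer_chunking_point (answer_string : String) (max_level : Int) : Prop :=
  max_level ≤ 10
instance (answer_string : String) (max_level : Int) : Decidable (Pre_parse_answer_chunking_point answer_string max_level) := by unfold Pre_parse_answer_chunking_point; infer_instance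

def pvWitness_parse_answer_chunking_point : String × Int :=
  ("12, Level One, x\n5, Level One, x\n7, Level One, x", 2)

def Spec_parse_answer_chunking_point (answer_string : String) (max_level : Int) (out : List (List Int)) : Prop := out = parse_answer_chunking_point_alt answer_string max_level
instance (answer_string : String) (max_level : Int) (out : List (List Int)) : Decidable (Spec_parse_answer_chunking_point answer_string max_level out) := by unfold Spec_parse_answer_chunking_point; infer_instance

-- ===== CLAIM (what is proved, stated in full; the proofs are below) =====
def Claim_equal_parse_answer_chunking_point : Prop := ∀ (answer_string : String) (max_level : Int), Dom_parse_answer_chunking_point answer_string max_level → Pre_parse_answer_chunking_point answer_string max_level → Spec_parse_answer_chunking_point answer_string max_level (parse_answer_chunking_point answer_string max_level)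

-- ===== LEMMAS AND PROOFS =====

-- the common "what this line contributes" parse: some (level, value) iff A appends / B consumes
def pvParse (line : String) : Option (String × Int) :=
  match pvSplit (PySem.Str.strip line) ", " with
  | p0 :: p1 :: _ :: _ => (PySem.Int.ofStr? p0).map (fun v => (p1, v))
  | _ => none

def pvPairs (lines : List String) : List (String × Int) := lines.filterMap pvParse

def pvRaw (lines : List String) (n : String) : List Int :=
  ((pvPairs lines).filter (fun p => p.1 == n)).map (·.2)

def pvNameA (i : Int) : String := (pvLevelDictEn.get? i).getD ""

def pvStep (st : List Int × Option Int) (v : Int) : List Int × Option Int :=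
  match st.2 with
  | none => (st.1 ++ [v], some v)
  | some last => (if v > last then st.1 ++ [v] else st.1, some v)

def pvAdj : List Int → List Int
  | a :: b :: t => (if b > a then [b] else []) ++ pvAdj (b :: t)
  | _ => []

def pvApplyA (d : PySem.Dict String (List Int)) : Option (String × Int) → PySem.Dict String (List Int)
  | some (k, v) => if d.contains k then d.modify k [] (· ++ [v]) else d
  | none => d

def pvApplyB (name : String) (st : List Int × Option Int) : Option (String × Int) → List Int × Option Int
  | some (k, v) => if k = name then pvStep st v else st
  | none => st

theorem pvSplit_empty : pvSplit "" ", " = [""] := by decide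

theorem bodyA_eq (d : PySem.Dict String (List Int)) (line : String) :
    pvBodyA d line = pvApplyA d (pvParse line) := by
  unfold pvBodyA pvParse
  by_cases h : PySem.Str.strip line = ""
  · simp [h, pvSplit_empty, pvApplyA]
  · simp only [if_neg h]
    cases hm : pvSplit (PySem.Str.strip line) ", " with
    | nil => rfl
    | cons p0 rest =>
      cases rest with
      | nil => rfl
      | cons p1 rest2 =>
        cases rest2 with
        | nil => rfl
        | cons p2 rest3 =>
          cases hk : PySem.Int.ofStr? p0 <;> by_cases hc : d.contains p1 <;>
            simp [hk, hc, pvApplyA]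

theorem bodyB_eq (name : String) (st : List Int × Option Int) (line : String) :
    pvBodyB name st line = pvApplyB name st (pvParse line) := by
  unfold pvBodyB pvParse
  cases hm : pvSplit (PySem.Str.strip line) ", " with
  | nil => rfl
  | cons p0 rest =>
    cases rest with
    | nil => rfl
    | cons p1 rest2 =>
      cases rest2 with
      | nil => rfl
      | cons p2 rest3 =>
        cases hk : PySem.Int.ofStr? p0 <;> by_cases hc : p1 = name <;>
          simp [hk, hc, pvApplyB, pvStep]

theorem foldB (lines : List String) (name : String) :
    ∀ st, lines.foldl (pvBodyB name) st = (pvRaw lines name).foldl pvStep st := by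
  induction lines with
  | nil => intro st; rfl
  | cons l t ih =>
    intro st
    rw [List.foldl_cons, bodyB_eq]
    cases hp : pvParse l with
    | none => simp only [pvApplyB]; rw [ih]; simp [pvRaw, pvPairs, hp]
    | some kv =>
      obtain ⟨k, v⟩ := kv
      simp only [pvApplyB]
      by_cases hk : k = name
      · subst hk; rw [if_pos rfl, ih]; simp [pvRaw, pvPairs, hp]
      · rw [if_neg hk, ih]; simp [pvRaw, pvPairs, hp, hk]

theorem fused_some (xs : List Int) :
    ∀ (kept : List Int) (l : Int), (xs.foldl pvStep (kept, some l)).1 = kept ++ pvAdj (l :: xs) := by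
  induction xs with
  | nil => intro kept l; simp [pvAdj]
  | cons v t ih =>
    intro kept l
    rw [List.foldl_cons]
    show (t.foldl pvStep (pvStep (kept, some l) v)).1 = _
    by_cases h : v > l
    · simp only [pvStep, if_pos h]
      rw [ih]
      simp [pvAdj, h]
    · simp only [pvStep, if_neg h]
      rw [ih]
      simp [pvAdj, h]

theorem fused (xs : List Int) :
    (xs.foldl pvStep (([] : List Int), (none : Option Int))).1 =
      match xs with | [] => [] | a :: t => a :: pvAdj (a :: t) := by
  cases xs with
  | nil => rfl
  | cons a t =>
    rw [List.foldl_cons]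
    show (t.foldl pvStep ([a], some a)).1 = _
    rw [fused_some]
    rfl

theorem pyGetD_zero {α : Type} (a : α) (l : List α) (d : α) :
    PySem.List.pyGetD (a :: l) 0 d = a := by
  have := PySem.List.pyGetD_natCast (a :: l) 0 d
  simpa using this

theorem pyGetD_succ {α : Type} (a : α) (l : List α) (i : Int) (d : α) (h : 0 ≤ i) :
    PySem.List.pyGetD (a :: l) (i + 1) d = PySem.List.pyGetD l i d := by
  obtain ⟨n, rfl⟩ : ∃ n : Nat, i = (n : Int) := ⟨i.toNat, (Int.toNat_of_nonneg h).symm⟩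
  have h1 : ((n : Int) + 1) = ((n + 1 : Nat) : Int) := by push_cast; ring
  rw [h1, PySem.List.pyGetD_natCast, PySem.List.pyGetD_natCast]
  rfl

theorem range_shift (n : Int) :
    PySem.List.pyRange 2 n = (PySem.List.pyRange 1 (n - 1)).map (· + 1) := by
  rw [PySem.List.pyRange_one, PySem.List.pyRange_one, List.map_map]
  have h : (n - 1 - 1).toNat = (n - 2).toNat := by omega
  rw [h]
  exact List.map_congr_left (fun a _ => by simp [Function.comp]; ring)

theorem keepA (xs : List Int) : ∀ (a : Int),
    ((PySem.List.pyRange 1 (((a :: xs).length : Int)) 1).filter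
        (fun i => PySem.List.pyGetD (a :: xs) i 0 > PySem.List.pyGetD (a :: xs) (i - 1) 0)).map
      (fun i => PySem.List.pyGetD (a :: xs) i 0) = pvAdj (a :: xs) := by
  induction xs with
  | nil =>
    intro a
    rw [PySem.List.pyRange_one_eq_nil (by simp)]
    simp [pvAdj]
  | cons b t ih =>
    intro a
    have e1 : PySem.List.pyGetD (a :: b :: t) (1 : Int) 0 = b := by
      rw [show (1 : Int) = 0 + 1 from by decide, pyGetD_succ _ _ _ _ le_rfl, pyGetD_zero]
    have e0 : PySem.List.pyGetD (a :: b :: t) ((1 : Int) - 1) 0 = a := by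
      rw [show (1 : Int) - 1 = (0 : Int) from by decide, pyGetD_zero]
    have hlen : (((a :: b :: t).length : Int)) = (t.length : Int) + 2 := by
      simp [List.length_cons]; omega
    have hcons : PySem.List.pyRange 1 (((a :: b :: t).length : Int)) 1 =
        1 :: (PySem.List.pyRange 1 (((b :: t).length : Int)) 1).map (· + 1) := by
      rw [hlen, PySem.List.pyRange_one_cons (by omega), show (1 : Int) + 1 = 2 from by decide,
          range_shift, show ((t.length : Int) + 2) - 1 = (((b :: t).length : Int)) from by
            simp [List.length_cons]; omega]
    have htail :
        (((PySem.List.pyRange 1 (((b :: t).length : Int)) 1).map (· + 1)).filter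
            (fun i => PySem.List.pyGetD (a :: b :: t) i 0 > PySem.List.pyGetD (a :: b :: t) (i - 1) 0)).map
          (fun i => PySem.List.pyGetD (a :: b :: t) i 0) = pvAdj (b :: t) := by
      rw [List.filter_map, List.map_map]
      have hQ : ∀ i ∈ PySem.List.pyRange 1 (((b :: t).length : Int)) 1,
          ((fun i => decide (PySem.List.pyGetD (a :: b :: t) i 0 >
              PySem.List.pyGetD (a :: b :: t) (i - 1) 0)) ∘ (· + 1)) i =
          (fun i => decide (PySem.List.pyGetD (b :: t) i 0 >
              PySem.List.pyGetD (b :: t) (i - 1) 0)) i := by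
        intro i hi
        have hb := PySem.List.mem_pyRange_one.mp hi
        show decide (PySem.List.pyGetD (a :: b :: t) (i + 1) 0 >
            PySem.List.pyGetD (a :: b :: t) (i + 1 - 1) 0) = _
        rw [show i + 1 - 1 = (i - 1) + 1 from by ring,
            pyGetD_succ a (b :: t) i 0 (by omega),
            pyGetD_succ a (b :: t) (i - 1) 0 (by omega)]
      rw [List.filter_congr hQ]
      have hG : ∀ i ∈ (PySem.List.pyRange 1 (((b :: t).length : Int)) 1).filter
            (fun i => decide (PySem.List.pyGetD (b :: t) i 0 >
              PySem.List.pyGetD (b :: t) (i - 1) 0)),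
          ((fun i => PySem.List.pyGetD (a :: b :: t) i 0) ∘ (· + 1)) i =
          (fun i => PySem.List.pyGetD (b :: t) i 0) i := by
        intro i hi
        have hb := PySem.List.mem_pyRange_one.mp (List.mem_of_mem_filter hi)
        show PySem.List.pyGetD (a :: b :: t) (i + 1) 0 = _
        exact pyGetD_succ a (b :: t) i 0 (by omega)
      rw [List.map_congr_left hG]
      exact ih b
    by_cases hba : b > a
    · rw [hcons, List.filter_cons, if_pos (by rw [e1, e0]; exact decide_eq_true hba),
          List.map_cons, htail]
      rw [e1]
      simp [pvAdj, hba]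
    · rw [hcons, List.filter_cons,
          if_neg (by rw [e1, e0]; simp [hba]), htail]
      simp [pvAdj, hba]

theorem filterA_eq_fused (xs : List Int) :
    pvFilterA xs = (xs.foldl pvStep (([] : List Int), (none : Option Int))).1 := by
  cases xs with
  | nil => rfl
  | cons a t =>
    simp only [pvFilterA]
    rw [if_neg (by simp), keepA t a, pyGetD_zero, fused]

theorem names_nodup (m : Int) (hm : m ≤ 10) :
    ((PySem.List.pyRange 0 m 1).map pvNameA).Nodup := by
  by_cases h : m ≤ 0
  · rw [PySem.List.pyRange_one_eq_nil h]; simp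
  · have h1 : 1 ≤ m := by omega
    interval_cases m <;> decide

theorem init_items (m : Int) (hm : m ≤ 10) :
    (pvInitDict m).items = (PySem.List.pyRange 0 m 1).map (fun i => (pvNameA i, ([] : List Int))) := by
  unfold pvInitDict
  have := PySem.Dict.items_foldl_insert_fresh (PySem.List.pyRange 0 m 1) pvNameA
      (fun _ => ([] : List Int)) PySem.Dict.empty
      (by intro a _; simp [PySem.Dict.contains_empty]) (names_nodup m hm)
  simpa [pvNameA, PySem.Dict.empty] using this

theorem init_keys (m : Int) (hm : m ≤ 10) :
    (pvInitDict m).keys = (PySem.List.pyRange 0 m 1).map pvNameA := by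
  simp only [PySem.Dict.keys]
  rw [init_items m hm, List.map_map]
  exact List.map_congr_left (fun i _ => rfl)

theorem init_getD (m : Int) (hm : m ≤ 10) (n : String) (hn : n ∈ (pvInitDict m).keys) :
    (pvInitDict m).getD n [] = [] := by
  rw [init_keys m hm] at hn
  obtain ⟨i, hi, rfl⟩ := List.mem_map.mp hn
  apply PySem.Dict.getD_of_mem_items
  · rw [init_items m hm]
    exact List.mem_map.mpr ⟨i, hi, rfl⟩
  · rw [init_keys m hm]; exact names_nodup m hm

theorem foldA_pairs (lines : List String) :
    ∀ (d : PySem.Dict String (List Int)),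
      lines.foldl pvBodyA d =
        ((pvPairs lines).filter (fun p => d.contains p.1)).foldl
          (fun d p => d.modify p.1 [] (· ++ [p.2])) d ∧
      (lines.foldl pvBodyA d).keys = d.keys := by
  induction lines with
  | nil => intro d; simp [pvPairs]
  | cons l t ih =>
    intro d
    rw [List.foldl_cons, bodyA_eq]
    cases hp : pvParse l with
    | none =>
      simp only [pvApplyA]
      refine ⟨?_, (ih d).2⟩
      rw [(ih d).1]
      simp [pvPairs, hp]
    | some kv =>
      obtain ⟨k, v⟩ := kv
      simp only [pvApplyA]
      by_cases hc : d.contains k = true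
      · rw [if_pos hc]
        have hkeys : (d.modify k [] (· ++ [v])).keys = d.keys := by
          rw [PySem.Dict.keys_modify]
          apply PySem.Dict.keys_insert_of_contains
          exact hc
        have hcont : (fun p : String × Int => (d.modify k [] (· ++ [v])).contains p.1) =
            (fun p => d.contains p.1) := by
          funext p
          rw [PySem.Dict.contains_modify]
          by_cases he : p.1 = k
          · simp [he, hc]
          · simp [he]
        obtain ⟨ih1, ih2⟩ := ih (d.modify k [] (· ++ [v]))
        refine ⟨?_, by rw [ih2, hkeys]⟩
        rw [ih1, hcont]
        simp [pvPairs, hp, hc]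
      · rw [if_neg hc]
        refine ⟨?_, (ih d).2⟩
        rw [(ih d).1]
        have hcf : d.contains k = false := by revert hc; cases d.contains k <;> simp
        simp [pvPairs, hp, hcf]

theorem nameAB (i : Int) (h0 : 0 ≤ i) (h10 : i < 10) :
    pvNameA i = PySem.List.pyGetD pvLevelNames i "" := by
  interval_cases i <;> decide

theorem parse_empty : pvParse "" = none := by decide

theorem split_nl_empty : pvSplit "" "\n" = [""] := by decide

-- ===== VERDICT (by name: the statement is the Claim_ definition above) =====
theorem parse_answer_chunking_point_spec : Claim_equal_parse_answer_chunking_point := by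
  intro answer_string max_level _ hpre
  unfold Spec_parse_answer_chunking_point
  unfold parse_answer_chunking_point parse_answer_chunking_point_alt
  by_cases he : answer_string = ""
  · subst he
    rw [if_pos rfl]
    show List.map (fun x => x.2) (pvInitDict max_level).items =
      List.map (fun i =>
          (List.foldl (pvBodyB (PySem.List.pyGetD pvLevelNames i ""))
            (([] : List Int), (none : Option Int)) (pvSplit "" "\n")).1)
        (PySem.List.pyRange 0 max_level 1)
    rw [init_items max_level hpre, List.map_map, split_nl_empty]
    apply List.map_congr_left
    intro i _
    show ([] : List Int) =
      (List.foldl (pvBodyB (PySem.List.pyGetD pvLevelNames i ""))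
        (([] : List Int), (none : Option Int)) [""]).1
    rw [foldB, show pvRaw [""] (PySem.List.pyGetD pvLevelNames i "") = [] from by
      simp [pvRaw, pvPairs, parse_empty]]
    rfl
  · rw [if_neg he]
    show List.map pvFilterA
        (List.foldl pvBodyA (pvInitDict max_level) (pvSplit answer_string "\n")).values =
      List.map (fun i =>
          (List.foldl (pvBodyB (PySem.List.pyGetD pvLevelNames i ""))
            (([] : List Int), (none : Option Int)) (pvSplit answer_string "\n")).1)
        (PySem.List.pyRange 0 max_level 1)
    obtain ⟨hfold, hkeys⟩ := foldA_pairs (pvSplit answer_string "\n") (pvInitDict max_level)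
    have hnodup : (List.foldl pvBodyA (pvInitDict max_level) (pvSplit answer_string "\n")).keys.Nodup := by
      rw [hkeys, init_keys max_level hpre]; exact names_nodup max_level hpre
    rw [PySem.Dict.values_eq_map_keys _ hnodup [], hkeys, init_keys max_level hpre,
        List.map_map, List.map_map]
    apply List.map_congr_left
    intro i hi
    have hb := PySem.List.mem_pyRange_one.mp hi
    have hmem : pvNameA i ∈ (pvInitDict max_level).keys := by
      rw [init_keys max_level hpre]
      exact List.mem_map.mpr ⟨i, hi, rfl⟩
    have hgd : (List.foldl pvBodyA (pvInitDict max_level) (pvSplit answer_string "\n")).getD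
        (pvNameA i) [] = pvRaw (pvSplit answer_string "\n") (pvNameA i) := by
      rw [hfold, PySem.Dict.getD_foldl_modify_append, init_getD max_level hpre _ hmem,
          List.filter_filter]
      simp only [List.nil_append]
      unfold pvRaw
      congr 1
      apply List.filter_congr
      intro p _
      by_cases hpk : p.1 = pvNameA i
      · have hcp : (pvInitDict max_level).contains (pvNameA i) = true :=
          (PySem.Dict.contains_iff_mem_keys _ _).mpr hmem
        simp [hpk, hcp]
      · simp [hpk]
    have h10 : max_level ≤ 10 := hpre
    simp only [Function.comp]
    rw [hgd, foldB, ← filterA_eq_fused, nameAB i hb.1 (by omega)]
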